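-- pv_equiv track=rewrite | github.com/statgenetics/phenoman | src/phenoman-src-1.0rc/pheno_man/pheno_man.py | recode_categorical
-- ===== SOURCE A (Python) =====
-- from collections import OrderedDict, Counter
--
-- def recode_categorical(d, k, refgrp=None):
--     if k not in d.keys():
--         raise ValueError("Field name '{}' not found".format(k))
--     if refgrp and refgrp not in d[k]:
--         raise ValueError("Reference group name '{}' not found in field {}".format(refgrp, k))
--     mapping = OrderedDict()
--     i = 65
--     if refgrp:
--         mapping[refgrp] = 'A'
--         i = 66
--     for item in d[k]:
--         if item not in mapping.keys():
--             mapping[item] = str(chr(i))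
--             i += 1
--     for idx, item in enumerate(d[k]):
--         d[k][idx] = mapping[item]
--     return d, mapping
-- ===== SOURCE B (Python) =====
-- from collections import OrderedDict
--
-- def recode_categorical(d, k, refgrp=None):
--     if k not in d.keys():
--         raise ValueError("Field name '{}' not found".format(k))
--     if refgrp and refgrp not in d[k]:
--         raise ValueError("Reference group name '{}' not found in field {}".format(refgrp, k))
--     vals = d[k]
--     # rank every distinct value by its first-occurrence position (the reference
--     # group is pinned to rank -1); the keys are pairwise distinct, so the sort
--     # order is fully determined and letters follow first-occurrence order.
--     def rank(v):
--         return -1 if (refgrp and v == refgrp) else vals.index(v)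
--     order = sorted(set(vals), key=rank)
--     mapping = OrderedDict((v, chr(65 + i)) for i, v in enumerate(order))
--     vals[:] = [mapping[v] for v in vals]
--     return d, mapping
-- ===== Notes on version B (the rewrite author's own statement) =====
-- stated objective: alternative
-- what changed: Replaces A's incremental mapping build (membership-checked inserts with a running character counter) by a sort-based ranking: sort set(vals) by first-occurrence index (reference group pinned to rank -1), derive the letter codes from the sorted positions, and recode the column with one comprehension.
import Mathlib
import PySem

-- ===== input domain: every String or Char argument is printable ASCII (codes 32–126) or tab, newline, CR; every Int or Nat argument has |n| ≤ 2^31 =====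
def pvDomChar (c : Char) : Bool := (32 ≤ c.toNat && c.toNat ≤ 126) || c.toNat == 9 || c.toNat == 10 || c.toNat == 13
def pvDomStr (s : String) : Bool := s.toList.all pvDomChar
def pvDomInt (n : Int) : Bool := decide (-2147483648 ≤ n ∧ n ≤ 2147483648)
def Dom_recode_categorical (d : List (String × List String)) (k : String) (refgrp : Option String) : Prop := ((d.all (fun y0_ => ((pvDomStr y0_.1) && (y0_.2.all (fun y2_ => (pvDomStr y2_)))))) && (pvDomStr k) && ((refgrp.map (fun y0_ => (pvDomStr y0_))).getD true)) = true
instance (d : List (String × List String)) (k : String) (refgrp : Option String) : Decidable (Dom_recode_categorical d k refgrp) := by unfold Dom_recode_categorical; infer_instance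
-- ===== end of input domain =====

-- ===== PORT A =====
-- B recodes the categorical field by sorting set(vals) by first-occurrence index (reference
-- group pinned to rank -1) instead of A's incremental membership-checked mapping build;
-- return values agree wherever A returns.
-- (Python A mutates d[k] in place; Python B performs the same in-place mutation via vals[:] = ….)

-- shared Python-dict-semantics helpers: d[k] (first match) and in-place update of d[k]
def pvGetVal : List (String × List String) → String → List String
  | [], _ => []
  | p :: rest, k => if p.1 = k then p.2 else pvGetVal rest k

def pvSetVal : List (String × List String) → String → List String → List (String × List String)
  | [], _, _ => []
  | p :: rest, k, v => if p.1 = k then (p.1, v) :: rest else p :: pvSetVal rest k v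

-- A's mapping-building loop: for item in d[k]: if item not in mapping: mapping[item] = chr(i); i += 1
def recAbuild : List String → PySem.Dict String String → Nat → PySem.Dict String String
  | [], m, _ => m
  | x :: xs, m, i =>
    if m.contains x then recAbuild xs m i
    else recAbuild xs (m.insert x (String.ofList [Char.ofNat i])) (i + 1)

-- mapping = OrderedDict(); i = 65; if refgrp: mapping[refgrp] = 'A'; i = 66; then the loop
def recAmap (vals : List String) (r : String) : PySem.Dict String String :=
  if r ≠ "" then recAbuild vals (PySem.Dict.empty.insert r "A") 66
  else recAbuild vals PySem.Dict.empty 65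

-- for idx, item in enumerate(d[k]): d[k][idx] = mapping[item]   (mapping[item] always present)
def recArecode (vals : List String) (m : PySem.Dict String String) : List String :=
  (PySem.List.enumerate vals 0).foldl (fun acc p => PySem.List.pySetD acc p.1 (m.getD p.2 "")) vals

def recode_categorical (d : List (String × List String)) (k : String) (refgrp : Option String) : (List (String × List String)) × (List (String × String)) :=
  if k ∈ d.map Prod.fst then
    -- 'if refgrp and refgrp not in d[k]: raise ValueError' — outside Pre_, junk value
    if refgrp.getD "" ≠ "" ∧ refgrp.getD "" ∉ pvGetVal d k then (d, [])
    else
      (pvSetVal d k (recArecode (pvGetVal d k) (recAmap (pvGetVal d k) (refgrp.getD ""))),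
       (recAmap (pvGetVal d k) (refgrp.getD "")).items)
  else (d, [])  -- 'raise ValueError' — outside Pre_, junk value

-- ===== PORT B =====
-- rank(v) = -1 if (refgrp and v == refgrp) else vals.index(v)   (vals.index total here: v ∈ vals)
def recBkey (vals : List String) (r : String) (v : String) : Int :=
  if r ≠ "" ∧ v = r then -1 else ((PySem.List.index? vals v).getD 0 : Int)

-- order = sorted(set(vals), key=rank)
def recBorder (vals : List String) (r : String) : List String :=
  PySem.List.sorted (PySem.Set.ofList vals) (recBkey vals r) false

-- mapping = OrderedDict((v, chr(65 + i)) for i, v in enumerate(order))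
def recBmap (order : List String) : PySem.Dict String String :=
  ((PySem.List.enumerate order 0).map (fun p => (p.2, String.ofList [Char.ofNat (65 + p.1).toNat]))).foldl
    (fun m p => m.insert p.1 p.2) PySem.Dict.empty

def recode_categorical_alt (d : List (String × List String)) (k : String) (refgrp : Option String) : (List (String × List String)) × (List (String × String)) :=
  if k ∈ d.map Prod.fst then
    if refgrp.getD "" ≠ "" ∧ refgrp.getD "" ∉ pvGetVal d k then (d, [])  -- ValueError, outside Pre_
    else
      (pvSetVal d k ((pvGetVal d k).map
          (fun v => (recBmap (recBorder (pvGetVal d k) (refgrp.getD ""))).getD v "")),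
       (recBmap (recBorder (pvGetVal d k) (refgrp.getD ""))).items)
  else (d, [])  -- ValueError, outside Pre_

-- ===== PRECONDITION & SPEC =====
-- Pre_ excludes exactly the inputs on which A raises ValueError: a field name k absent from d,
-- and a nonempty refgrp that does not occur in d[k].
def Pre_recode_categorical (d : List (String × List String)) (k : String) (refgrp : Option String) : Prop :=
  k ∈ d.map Prod.fst ∧ (∀ r : String, refgrp = some r → r ≠ "" → r ∈ (d.lookup k).getD [])
instance (d : List (String × List String)) (k : String) (refgrp : Option String) : Decidable (Pre_recode_categorical d k refgrp) := by unfold Pre_recode_categorical; infer_instance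

def pvWitness_recode_categorical : (List (String × List String)) × String × Option String :=
  ([("f", ["x", "y", "x", "z"])], "f", some "y")

def Spec_recode_categorical (d : List (String × List String)) (k : String) (refgrp : Option String) (out : (List (String × List String)) × (List (String × String))) : Prop := out = recode_categorical_alt d k refgrp
instance (d : List (String × List String)) (k : String) (refgrp : Option String) (out : (List (String × List String)) × (List (String × String))) : Decidable (Spec_recode_categorical d k refgrp out) := by unfold Spec_recode_categorical; infer_instance

-- ===== CLAIM (what is proved, stated in full; the proofs are below) =====
def Claim_equal_recode_categorical : Prop := ∀ (d : List (String × List String)) (k : String) (refgrp : Option String), Dom_recode_categorical d k refgrp → Pre_recode_categorical d k refgrp → Spec_recode_categorical d k refgrp (recode_categorical d k refgrp)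

-- ===== LEMMAS AND PROOFS =====

-- first-occurrence dedup of xs, skipping anything in seen (a proof-side reformulation)
def pvSieve (seen : List String) : List String → List String
  | [] => []
  | x :: xs => if x ∈ seen then pvSieve seen xs else x :: pvSieve (x :: seen) xs

lemma pvSieve_congr : ∀ (xs s t : List String), (∀ a, a ∈ s ↔ a ∈ t) → pvSieve s xs = pvSieve t xs := by
  intro xs
  induction xs with
  | nil => intro s t _; rfl
  | cons x xs ih =>
    intro s t h
    simp only [pvSieve]
    by_cases hx : x ∈ s
    · rw [if_pos hx, if_pos ((h x).mp hx)]; exact ih s t h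
    · rw [if_neg hx, if_neg (fun hc => hx ((h x).mpr hc))]
      exact congrArg (x :: ·) (ih _ _ (by intro a; simp [h a]))

lemma foldl_add_eq_sieve : ∀ (xs s : List String), xs.foldl PySem.Set.add s = s ++ pvSieve s xs := by
  intro xs
  induction xs with
  | nil => intro s; simp [pvSieve]
  | cons x xs ih =>
    intro s
    have hadd : PySem.Set.add s x = if x ∈ s then s else s ++ [x] := by
      simp [PySem.Set.add, PySem.Set.contains]
    simp only [List.foldl_cons, hadd, pvSieve]
    by_cases hx : x ∈ s
    · rw [if_pos hx, if_pos hx]; exact ih s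
    · rw [if_neg hx, if_neg hx, ih (s ++ [x]),
        pvSieve_congr xs (s ++ [x]) (x :: s) (by intro a; simp [or_comm])]
      simp

lemma dedup_eq_sieve (xs : List String) : PySem.List.dedup xs = pvSieve [] xs := by
  have h : PySem.List.dedup xs = xs.foldl PySem.Set.add [] := rfl
  rw [h, foldl_add_eq_sieve]; simp

lemma erase_sieve : ∀ (xs s : List String) (r : String), r ∉ s →
    (pvSieve s xs).erase r = pvSieve (r :: s) xs := by
  intro xs
  induction xs with
  | nil => intro s r _; rfl
  | cons x xs ih =>
    intro s r hr
    simp only [pvSieve]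
    by_cases hx : x ∈ s
    · rw [if_pos hx, if_pos (List.mem_cons_of_mem r hx)]; exact ih s r hr
    · rw [if_neg hx]
      by_cases hxr : x = r
      · subst hxr
        rw [List.erase_cons_head, if_pos (List.mem_cons_self)]
      · rw [if_neg (fun hc => (List.mem_cons.mp hc).elim hxr hx)]
        rw [List.erase_cons_tail (by simp only [beq_iff_eq]; exact hxr)]
        rw [ih (x :: s) r (fun hc => (List.mem_cons.mp hc).elim (fun h => hxr h.symm) hr)]
        exact congrArg (x :: ·) (pvSieve_congr xs _ _ (by intro a; constructor <;> (intro h; simp at h ⊢; tauto)))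

-- the pairs both mappings consist of: items of the order list paired with chr i, chr (i+1), …
def pvEnumChars (i : Nat) : List String → List (String × String)
  | [] => []
  | x :: xs => (x, String.ofList [Char.ofNat i]) :: pvEnumChars (i + 1) xs

lemma buildA_items : ∀ (xs : List String) (m : PySem.Dict String String) (i : Nat),
    (recAbuild xs m i).items = m.items ++ pvEnumChars i (pvSieve m.keys xs) := by
  intro xs
  induction xs with
  | nil => intro m i; simp [recAbuild, pvSieve, pvEnumChars]
  | cons x xs ih =>
    intro m i
    simp only [recAbuild, pvSieve]
    by_cases hx : m.contains x
    · rw [if_pos hx, if_pos ((PySem.Dict.contains_iff_mem_keys m x).mp hx), ih]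
    · have hx' : m.contains x = false := by simpa using hx
      rw [if_neg hx, if_neg (fun hc => hx ((PySem.Dict.contains_iff_mem_keys m x).mpr hc)), ih]
      rw [PySem.Dict.items_insert_of_not_contains m (String.ofList [Char.ofNat i]) hx',
        PySem.Dict.keys_insert_of_not_contains m (String.ofList [Char.ofNat i]) hx']
      rw [pvSieve_congr xs (m.keys ++ [x]) (x :: m.keys) (by intro a; simp [or_comm])]
      simp [pvEnumChars]

lemma enum_map_chars : ∀ (xs : List String) (n : Nat),
    ((PySem.List.enumerate xs (n : Int)).map (fun p => (p.2, String.ofList [Char.ofNat (65 + p.1).toNat])))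
      = pvEnumChars (65 + n) xs := by
  intro xs
  induction xs with
  | nil => intro n; simp [PySem.List.enumerate_nil, pvEnumChars]
  | cons x xs ih =>
    intro n
    rw [PySem.List.enumerate_cons]
    have h1 : ((n : Int) + 1) = ((n + 1 : Nat) : Int) := by push_cast; ring
    simp only [List.map_cons, h1, ih (n + 1), pvEnumChars]
    have h2 : ((65 : Int) + (n : Int)).toNat = 65 + n := by omega
    have h3 : 65 + (n + 1) = 65 + n + 1 := by omega
    rw [h2, h3]

lemma recBmap_items (order : List String) (hn : order.Nodup) :
    (recBmap order).items = pvEnumChars 65 order := by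
  unfold recBmap
  have hmapfst : (((PySem.List.enumerate order 0).map
      (fun p => (p.2, String.ofList [Char.ofNat (65 + p.1).toNat]))).map Prod.fst) = order := by
    rw [List.map_map]
    exact PySem.List.map_snd_enumerate order 0
  rw [PySem.Dict.items_foldl_insert_fresh _ Prod.fst Prod.snd PySem.Dict.empty
      (by intro a _; rfl) (by rw [hmapfst]; exact hn)]
  have hid : ∀ (l : List (String × String)), l.map (fun a => (a.1, a.2)) = l := by
    intro l; induction l with
    | nil => rfl
    | cons a t ih => simp [ih]
  have he : (PySem.Dict.empty : PySem.Dict String String).items = [] := rfl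
  rw [he, List.nil_append, hid,
    show (0 : Int) = ((0 : Nat) : Int) from rfl, enum_map_chars order 0]

-- vals.index(v) for v ∈ vals, as a plain idxOf
lemma index?_mem : ∀ (l : List String) (a : String), a ∈ l → PySem.List.index? l a = some (List.idxOf a l) := by
  intro l a
  rw [PySem.List.index?_eq_idxOf?]
  induction l with
  | nil => simp
  | cons x xs ih =>
    intro h
    by_cases hx : x = a
    · subst hx; simp [List.idxOf?_cons, List.idxOf_cons_self]
    · have hm : a ∈ xs := by rcases List.mem_cons.mp h with h | h; exact absurd h.symm hx; exact h
      simp [List.idxOf?_cons, List.idxOf_cons_ne xs hx, beq_eq_false_iff_ne.mpr hx, ih hm]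

-- the ordered-unique list keeps values in strictly increasing first-occurrence order
lemma dedup_cons (x : String) (rest : List String) :
    PySem.List.dedup (x :: rest) = x :: (PySem.List.dedup rest).erase x := by
  rw [dedup_eq_sieve, dedup_eq_sieve]
  simp only [pvSieve]
  rw [if_neg (List.not_mem_nil), erase_sieve rest [] x (by simp)]

lemma pairwise_idx : ∀ (vals : List String),
    (PySem.List.dedup vals).Pairwise (fun a b => List.idxOf a vals < List.idxOf b vals) := by
  intro vals
  induction vals with
  | nil => simp [PySem.List.dedup]
  | cons x rest ih =>
    rw [dedup_cons]
    have hnd : (PySem.List.dedup rest).Nodup := PySem.List.nodup_dedup rest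
    refine List.pairwise_cons.mpr ⟨?_, ?_⟩
    · intro b hb
      have hbne : b ≠ x := ((List.Nodup.mem_erase_iff hnd).mp hb).1
      rw [List.idxOf_cons_self, List.idxOf_cons_ne rest (fun h => hbne h.symm)]
      omega
    · have hsub : ((PySem.List.dedup rest).erase x).Pairwise
          (fun a b => List.idxOf a rest < List.idxOf b rest) :=
        ih.sublist List.erase_sublist
      refine List.Pairwise.imp_of_mem ?_ hsub
      intro a b ha hb hr
      have hane : a ≠ x := ((List.Nodup.mem_erase_iff hnd).mp ha).1
      have hbne : b ≠ x := ((List.Nodup.mem_erase_iff hnd).mp hb).1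
      rw [List.idxOf_cons_ne rest (fun h => hane h.symm),
        List.idxOf_cons_ne rest (fun h => hbne h.symm)]
      omega

-- the sorted order is exactly first-occurrence order, with r moved to the front
lemma order_eq (vals : List String) (r : String) (hr : r = "" ∨ r ∈ vals) :
    recBorder vals r
      = if r ≠ "" then r :: (PySem.List.dedup vals).erase r else PySem.List.dedup vals := by
  have hdo : PySem.Set.ofList vals = PySem.List.dedup vals := (PySem.List.dedup_eq_ofList vals).symm
  have hkey : ∀ a, a ∈ PySem.List.dedup vals → a ≠ r ∨ r = "" →
      recBkey vals r a = (List.idxOf a vals : Int) := by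
    intro a ha hcase
    have hav : a ∈ vals := (PySem.List.mem_dedup vals a).mp ha
    unfold recBkey
    rw [if_neg (by rcases hcase with h | h; exact fun hc => h hc.2; exact fun hc => hc.1 h)]
    rw [index?_mem vals a hav]
    rfl
  unfold recBorder
  rw [hdo]
  by_cases h : r = ""
  · rw [if_neg (by simp [h])]
    refine PySem.List.sorted_eq_of_perm_of_pairwise_lt _ _ _ (List.Perm.refl _) ?_
    refine List.Pairwise.imp_of_mem ?_ (pairwise_idx vals)
    intro a b ha hb hlt
    rw [hkey a ha (Or.inr h), hkey b hb (Or.inr h)]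
    exact_mod_cast hlt
  · have hrv : r ∈ vals := hr.resolve_left h
    have hrd : r ∈ PySem.List.dedup vals := (PySem.List.mem_dedup vals r).mpr hrv
    have hnd : (PySem.List.dedup vals).Nodup := PySem.List.nodup_dedup vals
    rw [if_pos h]
    refine PySem.List.sorted_eq_of_perm_of_pairwise_lt _ _ _ (List.perm_cons_erase hrd).symm ?_
    refine List.pairwise_cons.mpr ⟨?_, ?_⟩
    · intro b hb
      have hbne : b ≠ r := ((List.Nodup.mem_erase_iff hnd).mp hb).1
      have hbd : b ∈ PySem.List.dedup vals := ((List.Nodup.mem_erase_iff hnd).mp hb).2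
      have hkr : recBkey vals r r = -1 := by unfold recBkey; rw [if_pos ⟨h, rfl⟩]
      rw [hkr, hkey b hbd (Or.inl hbne)]
      have : (0 : Int) ≤ (List.idxOf b vals : Int) := Int.natCast_nonneg _
      omega
    · have hsub : ((PySem.List.dedup vals).erase r).Pairwise
          (fun a b => List.idxOf a vals < List.idxOf b vals) :=
        (pairwise_idx vals).sublist List.erase_sublist
      refine List.Pairwise.imp_of_mem ?_ hsub
      intro a b ha hb hlt
      rw [hkey a ((List.Nodup.mem_erase_iff hnd).mp ha).2 (Or.inl ((List.Nodup.mem_erase_iff hnd).mp ha).1),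
        hkey b ((List.Nodup.mem_erase_iff hnd).mp hb).2 (Or.inl ((List.Nodup.mem_erase_iff hnd).mp hb).1)]
      exact_mod_cast hlt

-- the two mappings coincide
lemma map_eq (vals : List String) (r : String) (hr : r = "" ∨ r ∈ vals) :
    recAmap vals r = recBmap (recBorder vals r) := by
  apply PySem.Dict.ext
  by_cases h : r = ""
  · subst h
    have hu : recBorder vals "" = PySem.List.dedup vals := by
      rw [order_eq vals "" hr]; simp
    rw [show recAmap vals "" = recAbuild vals PySem.Dict.empty 65 from by simp [recAmap]]
    rw [buildA_items,
      recBmap_items _ (by rw [hu]; exact PySem.List.nodup_dedup vals),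
      hu, dedup_eq_sieve]
    rfl
  · have hrv : r ∈ vals := hr.resolve_left h
    have hrd : r ∈ PySem.List.dedup vals := (PySem.List.mem_dedup vals r).mpr hrv
    have hnd : (PySem.List.dedup vals).Nodup := PySem.List.nodup_dedup vals
    have horder : recBorder vals r = r :: (PySem.List.dedup vals).erase r := by
      rw [order_eq vals r hr, if_pos h]
    have hun : (recBorder vals r).Nodup := by
      rw [horder]
      exact List.nodup_cons.mpr ⟨List.Nodup.not_mem_erase hnd, hnd.erase r⟩
    rw [recBmap_items _ hun, horder]
    simp only [recAmap, if_pos h]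
    rw [buildA_items]
    have hcontains : (PySem.Dict.empty : PySem.Dict String String).contains r = false := rfl
    rw [PySem.Dict.items_insert_of_not_contains _ "A" hcontains,
      PySem.Dict.keys_insert_of_not_contains _ "A" hcontains]
    have hkeys : (PySem.Dict.empty : PySem.Dict String String).keys = [] := rfl
    have hitems : (PySem.Dict.empty : PySem.Dict String String).items = [] := rfl
    rw [hkeys, hitems]
    rw [dedup_eq_sieve, erase_sieve vals [] r (by simp)]
    have hA : String.ofList [Char.ofNat 65] = "A" := by decide
    simp [pvEnumChars, hA]

lemma set_len {α : Type} : ∀ (pref : List α) (x : α) (xs : List α) (v : α),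
    (pref ++ x :: xs).set pref.length v = pref ++ v :: xs := by
  intro pref
  induction pref with
  | nil => intro x xs v; rfl
  | cons p ps ih => intro x xs v; simp [ih]

lemma foldl_enum_set (f : String → String) : ∀ (l pref : List String),
    (PySem.List.enumerate l ((pref.length : Nat) : Int)).foldl
        (fun acc p => PySem.List.pySetD acc p.1 (f p.2)) (pref ++ l)
      = pref ++ l.map f := by
  intro l
  induction l with
  | nil => intro pref; simp [PySem.List.enumerate_nil]
  | cons x xs ih =>
    intro pref
    rw [PySem.List.enumerate_cons]
    simp only [List.foldl_cons]
    rw [PySem.List.pySetD_natCast, set_len]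
    have h1 : pref ++ f x :: xs = (pref ++ [f x]) ++ xs := by simp
    have h2 : ((pref.length : Nat) : Int) + 1 = (((pref ++ [f x]).length : Nat) : Int) := by
      simp
    rw [h1, h2, ih (pref ++ [f x])]
    simp

lemma recArecode_eq_map (vals : List String) (m : PySem.Dict String String) :
    recArecode vals m = vals.map (fun v => m.getD v "") := by
  unfold recArecode
  have h := foldl_enum_set (fun v => m.getD v "") vals []
  simpa using h

lemma lookup_eq_pvGetVal : ∀ (d : List (String × List String)) (k : String),
    (d.lookup k).getD [] = pvGetVal d k := by
  intro d k
  induction d with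
  | nil => rfl
  | cons p rest ih =>
    rcases p with ⟨a, v⟩
    by_cases h : a = k
    · subst h; simp [List.lookup, pvGetVal]
    · have hb : (k == a) = false := beq_eq_false_iff_ne.mpr (fun hc => h hc.symm)
      simp only [List.lookup, hb, pvGetVal, if_neg h]
      exact ih

-- ===== VERDICT (by name: the statement is the Claim_ definition above) =====
theorem recode_categorical_spec : Claim_equal_recode_categorical := by
  intro d k refgrp _hDom hPre
  obtain ⟨hk, hrf'⟩ := hPre
  have hrf : ∀ r : String, refgrp = some r → r ≠ "" → r ∈ pvGetVal d k := by
    intro r h1 h2; rw [← lookup_eq_pvGetVal]; exact hrf' r h1 h2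
  unfold Spec_recode_categorical recode_categorical recode_categorical_alt
  rw [if_pos hk, if_pos hk]
  have hr : refgrp.getD "" = "" ∨ refgrp.getD "" ∈ pvGetVal d k := by
    cases refgrp with
    | none => left; rfl
    | some r =>
      by_cases h : r = ""
      · left; simpa using h
      · right; simpa using hrf r rfl h
  have hguard : ¬ (refgrp.getD "" ≠ "" ∧ refgrp.getD "" ∉ pvGetVal d k) := by
    rcases hr with h | h
    · intro hc; exact hc.1 h
    · intro hc; exact hc.2 h
  rw [if_neg hguard, if_neg hguard]
  have hm := map_eq (pvGetVal d k) (refgrp.getD "") hr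
  rw [recArecode_eq_map, hm]
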